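-- pv_equiv track=rewrite | github.com/fbuetler/adventofcode | 2024/9/solve.py | block_with_id
-- ===== SOURCE A (Python) =====
-- def block_with_id(fs, id):
--     i = len(fs) - 1
--     while i >= 0 and fs[i] != id:
--         i -= 1
--
--     j = i
--     while j >= 0 and fs[j] == id:
--         j -= 1
--     return (j+1, i-j)
-- ===== SOURCE B (Python) =====
-- def block_with_id(fs, id):
--     res = (0, 0)
--     cur = 0
--     for idx, v in enumerate(fs):
--         if v == id:
--             cur += 1
--             res = (idx + 1 - cur, cur)
--         else:
--             cur = 0
--     return res
-- ===== Notes on version B (the rewrite author's own statement) =====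
-- stated objective: simpler
-- what changed: Replaces A's two-phase backward scan (find last occurrence of id, then extend left through the run) by a single forward fold over enumerate(fs) that keeps the start and length of the latest run of id (default (0,0)).
import Mathlib
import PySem

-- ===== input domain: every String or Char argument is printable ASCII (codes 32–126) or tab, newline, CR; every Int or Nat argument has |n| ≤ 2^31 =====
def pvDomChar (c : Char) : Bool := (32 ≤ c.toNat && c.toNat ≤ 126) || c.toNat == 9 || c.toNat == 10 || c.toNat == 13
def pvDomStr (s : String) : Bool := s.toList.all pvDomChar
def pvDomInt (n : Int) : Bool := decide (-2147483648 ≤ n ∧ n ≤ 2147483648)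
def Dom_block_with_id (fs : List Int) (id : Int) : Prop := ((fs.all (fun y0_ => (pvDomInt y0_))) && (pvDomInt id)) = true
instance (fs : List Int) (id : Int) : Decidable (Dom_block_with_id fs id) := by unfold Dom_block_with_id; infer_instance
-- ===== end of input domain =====

-- B replaces A's backward "find last occurrence, then extend left" two-phase scan by a single
-- forward fold that keeps the latest run of `id` seen so far (objective: simpler, same O(n) cost).

-- ===== PORT A =====
-- while i >= 0 and fs[i] != id: i -= 1   (the Nat argument is i+1; every index read is in
-- range 0 ≤ i < len fs, so List.getD is exact for Python's fs[i] here)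
def lastIdxLoop (fs : List Int) (id : Int) : Nat → Int
  | 0 => -1
  | n + 1 => if fs.getD n 0 ≠ id then lastIdxLoop fs id n else (n : Int)

-- while j >= 0 and fs[j] == id: j -= 1   (same representation: the Nat argument is j+1)
def extendLoop (fs : List Int) (id : Int) : Nat → Int
  | 0 => -1
  | n + 1 => if fs.getD n 0 = id then extendLoop fs id n else (n : Int)

def block_with_id (fs : List Int) (id : Int) : Int × Int :=
  let i := lastIdxLoop fs id fs.length
  let j := extendLoop fs id (i + 1).toNat
  (j + 1, i - j)

-- ===== PORT B =====
-- for idx, v in enumerate(fs): if v == id: cur += 1; res = (idx+1-cur, cur) else cur = 0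
def block_with_id_alt (fs : List Int) (id : Int) : Int × Int :=
  ((PySem.List.enumerate fs 0).foldl
    (fun (s : (Int × Int) × Int) p =>
      if p.2 = id then
        let cur := s.2 + 1
        ((p.1 + 1 - cur, cur), cur)
      else (s.1, 0))
    ((0, 0), 0)).1

-- ===== PRECONDITION & SPEC =====
def Spec_block_with_id (fs : List Int) (id : Int) (out : Int × Int) : Prop := out = block_with_id_alt fs id
instance (fs : List Int) (id : Int) (out : Int × Int) : Decidable (Spec_block_with_id fs id out) := by unfold Spec_block_with_id; infer_instance

-- ===== CLAIM (what is proved, stated in full; the proofs are below) =====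
def Claim_equal_block_with_id : Prop := ∀ (fs : List Int) (id : Int), Dom_block_with_id fs id → Spec_block_with_id fs id (block_with_id fs id)

-- ===== LEMMAS AND PROOFS =====

-- trailing run of `id` in fs (length of the maximal suffix of copies of id)
def trailRun (id : Int) (fs : List Int) : Nat :=
  (fs.reverse.takeWhile (fun x => decide (x = id))).length

theorem trailRun_append (id x : Int) (fs : List Int) :
    trailRun id (fs ++ [x]) = if x = id then trailRun id fs + 1 else 0 := by
  simp [trailRun, List.takeWhile]
  split_ifs with h <;> simp [h]

theorem trailRun_le (id : Int) (fs : List Int) : trailRun id fs ≤ fs.length := by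
  calc trailRun id fs ≤ fs.reverse.length := (List.takeWhile_sublist _).length_le
  _ = fs.length := by simp

theorem getD_append_lt (fs : List Int) (x : Int) (k : Nat) (h : k < fs.length) :
    (fs ++ [x]).getD k 0 = fs.getD k 0 := by
  simp [List.getD, List.getElem?_append_left h]

theorem getD_append_last (fs : List Int) (x : Int) :
    (fs ++ [x]).getD fs.length 0 = x := by
  simp [List.getD]

theorem lastIdxLoop_stable (fs : List Int) (x id : Int) :
    ∀ m, m ≤ fs.length → lastIdxLoop (fs ++ [x]) id m = lastIdxLoop fs id m := by
  intro m
  induction m with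
  | zero => intro _; rfl
  | succ n ih =>
    intro h
    simp only [lastIdxLoop, getD_append_lt fs x n (by omega)]
    rw [ih (by omega)]

theorem extendLoop_stable (fs : List Int) (x id : Int) :
    ∀ m, m ≤ fs.length → extendLoop (fs ++ [x]) id m = extendLoop fs id m := by
  intro m
  induction m with
  | zero => intro _; rfl
  | succ n ih =>
    intro h
    simp only [extendLoop, getD_append_lt fs x n (by omega)]
    rw [ih (by omega)]

theorem lastIdxLoop_bounds (fs : List Int) (id : Int) :
    ∀ m, -1 ≤ lastIdxLoop fs id m ∧ lastIdxLoop fs id m < m := by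
  intro m
  induction m with
  | zero => simp [lastIdxLoop]
  | succ n ih =>
    simp only [lastIdxLoop]
    split_ifs with h
    · exact ⟨ih.1, by have := ih.2; push_cast; omega⟩
    · constructor <;> [omega; (push_cast; omega)]

theorem extendLoop_eq (fs : List Int) (id : Int) :
    extendLoop fs id fs.length = (fs.length : Int) - trailRun id fs - 1 := by
  induction fs using List.reverseRecOn with
  | nil => simp [extendLoop, trailRun]
  | append_singleton fs x ih =>
    have hlen : (fs ++ [x]).length = fs.length + 1 := by simp
    rw [hlen]
    simp only [extendLoop, getD_append_last]
    rw [trailRun_append]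
    split_ifs with h
    · rw [extendLoop_stable fs x id fs.length le_rfl, ih]
      push_cast; omega
    · push_cast; omega

-- B's fold state after processing fs is (A's answer on fs, trailing run length of id)
theorem foldl_state (fs : List Int) (id : Int) :
    ((PySem.List.enumerate fs 0).foldl
      (fun (s : (Int × Int) × Int) p =>
        if p.2 = id then
          let cur := s.2 + 1
          ((p.1 + 1 - cur, cur), cur)
        else (s.1, 0))
      ((0, 0), 0))
    = (block_with_id fs id, (trailRun id fs : Int)) := by
  induction fs using List.reverseRecOn with
  | nil => simp [PySem.List.enumerate, block_with_id, lastIdxLoop, extendLoop, trailRun]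
  | append_singleton fs x ih =>
    rw [PySem.List.enumerate_append, List.foldl_append, ih]
    have hA1 := lastIdxLoop_bounds fs id fs.length
    have ht := trailRun_le id fs
    by_cases h : x = id
    · -- the new element extends (or starts) the trailing run of id
      simp only [PySem.List.enumerate_cons, PySem.List.enumerate_nil, List.foldl_cons,
        List.foldl_nil, if_pos h]
      rw [trailRun_append, if_pos h]
      have hi : lastIdxLoop (fs ++ [x]) id (fs ++ [x]).length = (fs.length : Int) := by
        simp only [List.length_append, List.length_cons, List.length_nil]
        simp only [lastIdxLoop, getD_append_last]
        rw [if_neg (by simpa using h)]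
      have hj : extendLoop (fs ++ [x]) id ((fs.length : Int) + 1).toNat
          = (fs.length : Int) - trailRun id fs - 1 := by
        have hlen2 : ((fs.length : Int) + 1).toNat = (fs ++ [x]).length := by simp
        rw [hlen2, extendLoop_eq, trailRun_append, if_pos h]
        push_cast; omega
      simp only [block_with_id, hi, hj, Prod.mk.injEq]
      refine ⟨⟨?_, ?_⟩, ?_⟩ <;> (push_cast; omega)
    · -- the new element is not id: A's loops skip it, B keeps its result and resets cur
      simp only [PySem.List.enumerate_cons, PySem.List.enumerate_nil, List.foldl_cons,
        List.foldl_nil, if_neg h]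
      rw [trailRun_append, if_neg h]
      have hAeq : block_with_id (fs ++ [x]) id = block_with_id fs id := by
        have hi : lastIdxLoop (fs ++ [x]) id (fs ++ [x]).length
            = lastIdxLoop fs id fs.length := by
          simp only [List.length_append, List.length_cons, List.length_nil]
          simp only [lastIdxLoop, getD_append_last]
          rw [if_pos h]
          exact lastIdxLoop_stable fs x id fs.length le_rfl
        have hle : (lastIdxLoop fs id fs.length + 1).toNat ≤ fs.length := by
          have := (lastIdxLoop_bounds fs id fs.length).2
          omega
        simp only [block_with_id, hi, extendLoop_stable fs x id _ hle]
      rw [hAeq]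
      simp

-- ===== VERDICT (by name: the statement is the Claim_ definition above) =====
theorem block_with_id_spec : Claim_equal_block_with_id := by
  intro fs id _
  unfold Spec_block_with_id block_with_id_alt
  rw [foldl_state]
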